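-- pv_equiv track=rewrite | github.com/RomanOdokienko/cybersecurity | scripts/audit_site.py | trim_sitemap_urls
-- ===== SOURCE A (Python) =====
-- LEGAL_URL_HINTS = [
--     'documents',
--     'document',
--     'docs',
--     'doc',
--     'правов',
--     'документ',
--     'policy',
--     'privacy',
--     'polit',
--     'legal',
-- ]
--
-- def dedupe_keep_order(items):
--     out = []
--     seen = set()
--     for x in items:
--         if x in seen:
--             continue
--         seen.add(x)
--         out.append(x)
--     return out
--
-- def trim_sitemap_urls(urls, max_urls: int):
--     urls = dedupe_keep_order(urls)
--     if len(urls) <= max_urls: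
--         return urls
--
--     high = []
--     other = []
--     for u in urls:
--         low = u.lower()
--         if is_contact_hint(low) or is_booking_hint(low) or is_legal_hint(low):
--             high.append(u)
--         else:
--             other.append(u)
--
--     out = []
--     for u in high + other:
--         if len(out) >= max_urls:
--             break
--         out.append(u)
--     return out
--
-- def is_contact_hint(s: str):
--     s = s.lower()
--     return any(k in s for k in ['контакт', 'contacts', 'contact', 'как добраться'])
--
-- def is_booking_hint(s: str):
--     s = s.lower()
--     return any(k in s for k in ['запис', 'appointment', 'booking', 'online'])
--
-- def is_legal_hint(s: str):
--     s = s.lower()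
--     return any(k in s for k in LEGAL_URL_HINTS)
-- ===== SOURCE B (Python) =====
-- LEGAL_URL_HINTS = [
--     'documents', 'document', 'docs', 'doc', 'правов',
--     'документ', 'policy', 'privacy', 'polit', 'legal',
-- ]
--
-- _HIGH_HINTS = ['контакт', 'contacts', 'contact', 'как добраться',
--                'запис', 'appointment', 'booking', 'online'] + LEGAL_URL_HINTS
--
-- def _is_high(u):
--     low = u.lower()
--     return any(k in low for k in _HIGH_HINTS)
--
-- def trim_sitemap_urls(urls, max_urls: int):
--     urls = list(dict.fromkeys(urls))
--     if len(urls) <= max_urls: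
--         return urls
--     ranked = sorted(urls, key=lambda u: 0 if _is_high(u) else 1)
--     return ranked[:max(max_urls, 0)]
-- ===== Notes on version B (the rewrite author's own statement) =====
-- stated objective: idiomatic
-- what changed: B dedupes with dict.fromkeys and replaces A's two-list partition plus a capped append loop by a single stable sort on a binary priority key followed by a guarded slice.
import Mathlib
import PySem

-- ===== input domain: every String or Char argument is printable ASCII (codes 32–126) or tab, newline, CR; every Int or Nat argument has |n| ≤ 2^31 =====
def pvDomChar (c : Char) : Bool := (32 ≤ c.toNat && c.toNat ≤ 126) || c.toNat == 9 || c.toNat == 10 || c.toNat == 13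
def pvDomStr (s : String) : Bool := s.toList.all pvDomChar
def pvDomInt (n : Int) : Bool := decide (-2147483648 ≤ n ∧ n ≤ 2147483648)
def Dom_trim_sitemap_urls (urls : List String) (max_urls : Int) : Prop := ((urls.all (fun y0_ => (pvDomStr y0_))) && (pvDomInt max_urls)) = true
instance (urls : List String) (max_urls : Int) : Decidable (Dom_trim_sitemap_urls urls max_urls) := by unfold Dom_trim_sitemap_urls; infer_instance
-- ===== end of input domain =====

-- B replaces A's partition-and-cap loops by dict.fromkeys dedup + a stable sort on a
-- binary priority key + a guarded slice (idiomatic; same cost in practice).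

-- ===== PORT A =====
def LEGAL_URL_HINTS : List String :=
  ["documents", "document", "docs", "doc", "правов",
   "документ", "policy", "privacy", "polit", "legal"]

def is_contact_hint (s : String) : Bool :=
  let s := PySem.Str.lower s
  ["контакт", "contacts", "contact", "как добраться"].any (fun k => PySem.Str.isIn k s)

def is_booking_hint (s : String) : Bool :=
  let s := PySem.Str.lower s
  ["запис", "appointment", "booking", "online"].any (fun k => PySem.Str.isIn k s)

def is_legal_hint (s : String) : Bool :=
  let s := PySem.Str.lower s
  LEGAL_URL_HINTS.any (fun k => PySem.Str.isIn k s)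

def dedupe_keep_order (items : List String) : List String :=
  (items.foldl
    (fun (st : List String × PySem.Set String) x =>
      if PySem.Set.contains st.2 x then st else (st.1 ++ [x], PySem.Set.add st.2 x))
    ([], PySem.Set.empty)).1

def trim_sitemap_urls (urls : List String) (max_urls : Int) : List String :=
  let urls := dedupe_keep_order urls
  if (urls.length : Int) ≤ max_urls then urls
  else
    let p := urls.foldl
      (fun (p : List String × List String) u =>
        let low := PySem.Str.lower u
        if is_contact_hint low || is_booking_hint low || is_legal_hint low then
          (p.1 ++ [u], p.2)
        else (p.1, p.2 ++ [u]))
      ([], [])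
    -- 'for u in high + other: if len(out) >= max_urls: break; out.append(u)' — the break is
    -- the guard staying true once reached (out only grows), so the guarded fold is exact.
    (p.1 ++ p.2).foldl
      (fun out u => if max_urls ≤ (out.length : Int) then out else out ++ [u]) []

-- ===== PORT B =====
def pvHighHints : List String :=
  ["контакт", "contacts", "contact", "как добраться",
   "запис", "appointment", "booking", "online"] ++ LEGAL_URL_HINTS

def pvIsHigh (u : String) : Bool :=
  let low := PySem.Str.lower u
  pvHighHints.any (fun k => PySem.Str.isIn k low)

def trim_sitemap_urls_alt (urls : List String) (max_urls : Int) : List String :=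
  let urls := PySem.List.dedup urls
  if (urls.length : Int) ≤ max_urls then urls
  else
    let ranked := PySem.List.sorted urls (fun u => if pvIsHigh u then (0 : Int) else 1) false
    PySem.List.slice ranked none (some (max max_urls 0))

-- ===== PRECONDITION & SPEC =====
def Spec_trim_sitemap_urls (urls : List String) (max_urls : Int) (out : List String) : Prop := out = trim_sitemap_urls_alt urls max_urls
instance (urls : List String) (max_urls : Int) (out : List String) : Decidable (Spec_trim_sitemap_urls urls max_urls out) := by unfold Spec_trim_sitemap_urls; infer_instance

-- ===== CLAIM (what is proved, stated in full; the proofs are below) =====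
def Claim_equal_trim_sitemap_urls : Prop := ∀ (urls : List String) (max_urls : Int), Dom_trim_sitemap_urls urls max_urls → Spec_trim_sitemap_urls urls max_urls (trim_sitemap_urls urls max_urls)

-- ===== LEMMAS AND PROOFS =====

theorem isupper_iff (d : Char) : PySem.Chars.isupper d = decide (65 ≤ d.toNat ∧ d.toNat ≤ 90) := by
  simp only [PySem.Chars.isupper, Char.le_def, UInt32.le_iff_toNat_le]
  show (decide (65 ≤ d.toNat) && decide (d.toNat ≤ 90)) = _
  simp

theorem lowerChar_idem (c : Char) :
    PySem.Chars.lowerChar (PySem.Chars.lowerChar c) = PySem.Chars.lowerChar c := by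
  simp only [PySem.Chars.lowerChar, isupper_iff, decide_eq_true_eq]
  by_cases h : 65 ≤ c.toNat ∧ c.toNat ≤ 90
  · rw [if_pos h]
    have hv : (Char.ofNat (c.toNat + 32)).toNat = c.toNat + 32 := by
      rw [Char.toNat_ofNat]
      have : (c.toNat + 32).isValidChar := Or.inl (by omega)
      simp [this]
    rw [if_neg (by rw [hv]; omega)]
  · rw [if_neg h, if_neg h]

theorem lower_idem (s : String) :
    PySem.Str.lower (PySem.Str.lower s) = PySem.Str.lower s := by
  simp only [PySem.Str.lower, PySem.Chars.lower, String.toList_ofList, List.map_map]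
  congr 1
  apply List.map_congr_left
  intro c _
  exact lowerChar_idem c

theorem dedupe_fold (l : List String) : ∀ s : PySem.Set String,
    (l.foldl
      (fun (st : List String × PySem.Set String) x =>
        if PySem.Set.contains st.2 x then st else (st.1 ++ [x], PySem.Set.add st.2 x))
      (s, s)).1
    = l.foldl PySem.Set.add s := by
  induction l with
  | nil => intro s; rfl
  | cons x xs ih =>
    intro s
    rw [List.foldl_cons, List.foldl_cons]
    by_cases h : PySem.Set.contains s x = true
    · have hm : x ∈ s := by simpa [PySem.Set.contains, List.contains_eq_mem] using h
      rw [if_pos h, show PySem.Set.add s x = s from by simp [PySem.Set.add, PySem.Set.contains, List.contains_eq_mem, hm]]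
      exact ih s
    · have hm : x ∉ s := by simpa [PySem.Set.contains, List.contains_eq_mem] using h
      rw [if_neg h, show PySem.Set.add s x = s ++ [x] from by simp [PySem.Set.add, PySem.Set.contains, List.contains_eq_mem, hm]]
      exact ih (s ++ [x])

theorem dedupe_keep_order_eq (items : List String) :
    dedupe_keep_order items = PySem.List.dedup items := by
  rw [PySem.List.dedup_eq_ofList, PySem.Set.ofList_eq_foldl]
  exact dedupe_fold items []

theorem hint_eq (u : String) :
    (is_contact_hint (PySem.Str.lower u) || is_booking_hint (PySem.Str.lower u) ||
      is_legal_hint (PySem.Str.lower u)) = pvIsHigh u := by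
  unfold is_contact_hint is_booking_hint is_legal_hint pvIsHigh pvHighHints LEGAL_URL_HINTS
  rw [lower_idem]
  simp [Bool.or_assoc]

theorem partition_eq' (l : List String) : ∀ (a b : List String),
    l.foldl
      (fun (p : List String × List String) u =>
        if pvIsHigh u then (p.1 ++ [u], p.2) else (p.1, p.2 ++ [u])) (a, b)
    = (a ++ l.filter pvIsHigh, b ++ l.filter (fun u => !pvIsHigh u)) := by
  induction l with
  | nil => intro a b; simp
  | cons x xs ih =>
    intro a b
    rw [List.foldl_cons]
    by_cases h : pvIsHigh x = true
    · rw [if_pos h, ih]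
      simp [h]
    · rw [if_neg h]
      rw [ih]
      simp only [List.filter_cons, h]
      simp [List.append_assoc]

theorem partition_eq (l : List String) (a b : List String) :
    l.foldl
      (fun (p : List String × List String) u =>
        let low := PySem.Str.lower u
        if is_contact_hint low || is_booking_hint low || is_legal_hint low then
          (p.1 ++ [u], p.2)
        else (p.1, p.2 ++ [u])) (a, b)
    = (a ++ l.filter pvIsHigh, b ++ l.filter (fun u => !pvIsHigh u)) := by
  rw [show (fun (p : List String × List String) u =>
        let low := PySem.Str.lower u
        if is_contact_hint low || is_booking_hint low || is_legal_hint low then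
          (p.1 ++ [u], p.2)
        else (p.1, p.2 ++ [u]))
      = (fun (p : List String × List String) u =>
        if pvIsHigh u then (p.1 ++ [u], p.2) else (p.1, p.2 ++ [u])) from by
    funext p u
    simp only [hint_eq]]
  exact partition_eq' l a b

def pvBefore (a b : String) : Bool :=
  decide ((if pvIsHigh a then (0 : Int) else 1) < (if pvIsHigh b then (0 : Int) else 1))

theorem insert_mid (x : String) (hx : pvIsHigh x = true) (O : List String)
    (hO : ∀ o ∈ O, pvIsHigh o = false) : ∀ H : List String,
    (∀ h ∈ H, pvIsHigh h = true) →
    PySem.List.insertBy pvBefore x (H ++ O) = H ++ x :: O := by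
  intro H
  induction H with
  | nil =>
    intro _
    cases O with
    | nil => rfl
    | cons o os =>
      have hb : pvBefore x o = true := by
        simp [pvBefore, hx, hO o (by simp)]
      simp [PySem.List.insertBy, hb]
  | cons h hs ih =>
    intro hH
    have hb : pvBefore x h = false := by
      simp [pvBefore, hx, hH h (by simp)]
    rw [List.cons_append]
    rw [show PySem.List.insertBy pvBefore x (h :: (hs ++ O))
          = h :: PySem.List.insertBy pvBefore x (hs ++ O) from by
      simp [PySem.List.insertBy, hb]]
    rw [ih (fun y hy => hH y (by simp [hy]))]
    simp

theorem insert_low (x : String) (hx : pvIsHigh x = false) (l : List String) :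
    PySem.List.insertBy pvBefore x l = l ++ [x] := by
  apply PySem.List.insertBy_of_forall_not_before
  intro y _
  simp [pvBefore, hx]
  split <;> omega

theorem ins_fold (l : List String) : ∀ (H O : List String),
    (∀ h ∈ H, pvIsHigh h = true) → (∀ o ∈ O, pvIsHigh o = false) →
    l.foldl (fun acc x => PySem.List.insertBy pvBefore x acc) (H ++ O)
    = (H ++ l.filter pvIsHigh) ++ (O ++ l.filter (fun u => !pvIsHigh u)) := by
  induction l with
  | nil => intro H O _ _; simp
  | cons x xs ih =>
    intro H O hH hO
    by_cases h : pvIsHigh x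
    · simp only [List.foldl_cons]
      rw [insert_mid x h O hO H hH]
      have : H ++ x :: O = (H ++ [x]) ++ O := by simp
      rw [this, ih (H ++ [x]) O
            (by intro y hy; rcases List.mem_append.mp hy with hy | hy
                · exact hH y hy
                · simp at hy; subst hy; exact h) hO]
      simp [h]
    · simp only [List.foldl_cons]
      rw [insert_low x (by simpa using h) (H ++ O)]
      rw [List.append_assoc, ih H (O ++ [x])
            hH
            (by intro y hy; rcases List.mem_append.mp hy with hy | hy
                · exact hO y hy
                · simp at hy; subst hy; simpa using h)]
      simp [h]

theorem sorted_binary_eq (l : List String) :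
    PySem.List.sorted l (fun u => if pvIsHigh u then (0 : Int) else 1) false
    = l.filter pvIsHigh ++ l.filter (fun u => !pvIsHigh u) := by
  rw [PySem.List.sorted_eq_foldl_insertBy]
  have h := ins_fold l [] [] (by simp) (by simp)
  simpa [pvBefore] using h

theorem cap_loop_eq (m : Int) (ys : List String) : ∀ acc : List String,
    ys.foldl (fun out u => if m ≤ (out.length : Int) then out else out ++ [u]) acc
    = acc ++ ys.take (m - acc.length).toNat := by
  induction ys with
  | nil => intro acc; simp
  | cons y ys ih =>
    intro acc
    rw [List.foldl_cons]
    by_cases h : m ≤ (acc.length : Int)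
    · have h0 : (m - acc.length).toNat = 0 := by omega
      rw [if_pos h, ih acc, h0]
      simp
    · have hstep : (m - acc.length).toNat = (m - ((acc ++ [y]).length : Int)).toNat + 1 := by
        simp only [List.length_append, List.length_cons, List.length_nil]
        push_cast
        omega
      rw [if_neg h, ih (acc ++ [y]), hstep]
      simp [List.take_succ_cons]

-- ===== VERDICT (by name: the statement is the Claim_ definition above) =====
theorem trim_sitemap_urls_spec : Claim_equal_trim_sitemap_urls := by
  intro urls max_urls _
  unfold Spec_trim_sitemap_urls trim_sitemap_urls trim_sitemap_urls_alt
  rw [dedupe_keep_order_eq]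
  by_cases hle : (((PySem.List.dedup urls).length : Int)) ≤ max_urls
  · rw [if_pos hle, if_pos hle]
  · rw [if_neg hle, if_neg hle]
    rw [partition_eq]
    dsimp only
    rw [sorted_binary_eq]
    rw [PySem.List.slice_to _ (le_max_right max_urls 0)]
    simp only [List.nil_append]
    rw [cap_loop_eq max_urls _ []]
    simp only [List.nil_append, List.length_nil, Int.natCast_zero, Int.sub_zero]
    congr 1
    omega
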